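-- pv_equiv track=rewrite | github.com/tys0815/rag2_agent | backend/backend_app/helloAgents/agents/react_agent.py | _build_react_history_str
-- ===== SOURCE A (Python) =====
-- from typing import Optional, List, Dict, Any, Tuple
--
-- def _build_react_history_str(messages: List[Dict[str, Any]]) -> str:
--     lines = []
--     step = 1
--     for msg in messages:
--         role = msg["role"]
--         content = msg.get("content", "").strip()
--         if not content:
--             continue
--         if role == "assistant":
--             lines.append(f"Step {step} - Thought: {content}")
--             step += 1
--         elif role == "tool":
--             lines.append(f"Step {step} - Observation: {content}")
--             step += 1
--     return "\n".join(lines) if lines else "无历史记录"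
-- ===== SOURCE B (Python) =====
-- from typing import Optional, List, Dict, Any, Tuple
--
-- def _fmt(msgs: List[Dict[str, Any]], step: int) -> Optional[str]:
--     """Formatted history of msgs starting at step, or None if nothing to show."""
--     if not msgs:
--         return None
--     head, tail = msgs[0], msgs[1:]
--     content = head.get("content", "").strip()
--     role = head["role"]
--     if content and role == "assistant":
--         line = f"Step {step} - Thought: {content}"
--     elif content and role == "tool":
--         line = f"Step {step} - Observation: {content}"
--     else:
--         return _fmt(tail, step)
--     rest = _fmt(tail, step + 1)
--     return line if rest is None else line + "\n" + rest
--
-- def _build_react_history_str(messages: List[Dict[str, Any]]) -> str: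
--     result = _fmt(messages, 1)
--     return result if result is not None else "无历史记录"
-- ===== Notes on version B (the rewrite author's own statement) =====
-- stated objective: alternative
-- what changed: Replaces A's iterative loop that accumulates a list of lines plus a manual step counter and joins the list at the end by a structural recursion returning Optional[str]: each kept message prepends its formatted line to the recursively formatted tail (no list, no join).
import Mathlib
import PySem

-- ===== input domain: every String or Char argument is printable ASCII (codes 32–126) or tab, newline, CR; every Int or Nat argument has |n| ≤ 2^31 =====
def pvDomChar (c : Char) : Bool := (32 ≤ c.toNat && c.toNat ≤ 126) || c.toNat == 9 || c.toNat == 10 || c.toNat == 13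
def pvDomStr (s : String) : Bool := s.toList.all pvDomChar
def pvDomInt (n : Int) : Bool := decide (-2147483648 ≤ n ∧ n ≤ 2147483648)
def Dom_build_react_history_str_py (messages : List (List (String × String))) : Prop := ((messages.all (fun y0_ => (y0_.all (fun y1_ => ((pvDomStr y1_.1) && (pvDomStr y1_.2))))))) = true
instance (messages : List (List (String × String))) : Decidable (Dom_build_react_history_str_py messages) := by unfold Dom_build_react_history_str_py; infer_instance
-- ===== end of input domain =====

-- B replaces A's iterative list-of-lines + counter + join by a structural recursion returning Option String, prepending each kept line to the formatted tail; same cost, alternative structure.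

-- ===== PORT A =====
def build_react_history_str_py (messages : List (List (String × String))) : String :=
  let st := messages.foldl (fun (st : List String × Int) msg =>
    let role := ((PySem.Dict.mk msg).get? "role").getD ""
    let content := PySem.Str.strip ((PySem.Dict.mk msg).getD "content" "")
    if content = "" then st
    else if role = "assistant" then
      (st.1 ++ ["Step " ++ PySem.Int.toStr st.2 ++ " - Thought: " ++ content], st.2 + 1)
    else if role = "tool" then
      (st.1 ++ ["Step " ++ PySem.Int.toStr st.2 ++ " - Observation: " ++ content], st.2 + 1)
    else st) ([], 1)
  if st.1 = [] then "无历史记录" else PySem.Str.join "\n" st.1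

-- ===== PORT B =====
-- port of Source B's _fmt: Optional formatted history of msgs starting at step
def pvFmt : List (List (String × String)) → Int → Option String
  | [], _ => none
  | head :: tail, step =>
    let content := PySem.Str.strip ((PySem.Dict.mk head).getD "content" "")
    let role := ((PySem.Dict.mk head).get? "role").getD ""
    if content ≠ "" ∧ role = "assistant" then
      let line := "Step " ++ PySem.Int.toStr step ++ " - Thought: " ++ content
      some (match pvFmt tail (step + 1) with
            | none => line
            | some rest => line ++ "\n" ++ rest)
    else if content ≠ "" ∧ role = "tool" then
      let line := "Step " ++ PySem.Int.toStr step ++ " - Observation: " ++ content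
      some (match pvFmt tail (step + 1) with
            | none => line
            | some rest => line ++ "\n" ++ rest)
    else pvFmt tail step

def build_react_history_str_py_alt (messages : List (List (String × String))) : String :=
  match pvFmt messages 1 with
  | some result => result
  | none => "无历史记录"

-- ===== PRECONDITION & SPEC =====
-- Pre_ excludes exactly the inputs where both programs raise KeyError: some message without a "role" key.
def Pre_build_react_history_str_py (messages : List (List (String × String))) : Prop :=
  (messages.all (fun m => (PySem.Dict.mk m).contains "role")) = true
instance (messages : List (List (String × String))) : Decidable (Pre_build_react_history_str_py messages) := by unfold Pre_build_react_history_str_py; infer_instance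
def pvWitness_build_react_history_str_py : (List (List (String × String))) :=
  [[("role", "assistant"), ("content", " think ")], [("role", "user"), ("content", "q")], [("role", "tool"), ("content", "ok")]]

def Spec_build_react_history_str_py (messages : List (List (String × String))) (out : String) : Prop := out = build_react_history_str_py_alt messages
instance (messages : List (List (String × String))) (out : String) : Decidable (Spec_build_react_history_str_py messages out) := by unfold Spec_build_react_history_str_py; infer_instance

-- ===== CLAIM (what is proved, stated in full; the proofs are below) =====
def Claim_equal_build_react_history_str_py : Prop := ∀ (messages : List (List (String × String))), Dom_build_react_history_str_py messages → Pre_build_react_history_str_py messages → Spec_build_react_history_str_py messages (build_react_history_str_py messages)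

-- ===== LEMMAS AND PROOFS =====

-- Proof helper: the list of lines that A accumulates, as a recursion carrying the step number.
def pvLines : List (List (String × String)) → Int → List String
  | [], _ => []
  | head :: tail, step =>
    let content := PySem.Str.strip ((PySem.Dict.mk head).getD "content" "")
    let role := ((PySem.Dict.mk head).get? "role").getD ""
    if content = "" then pvLines tail step
    else if role = "assistant" then
      ("Step " ++ PySem.Int.toStr step ++ " - Thought: " ++ content) :: pvLines tail (step + 1)
    else if role = "tool" then
      ("Step " ++ PySem.Int.toStr step ++ " - Observation: " ++ content) :: pvLines tail (step + 1)
    else pvLines tail step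

theorem pvFoldA_eq (messages : List (List (String × String))) (lines : List String) (step : Int) :
    messages.foldl (fun (st : List String × Int) msg =>
      let role := ((PySem.Dict.mk msg).get? "role").getD ""
      let content := PySem.Str.strip ((PySem.Dict.mk msg).getD "content" "")
      if content = "" then st
      else if role = "assistant" then
        (st.1 ++ ["Step " ++ PySem.Int.toStr st.2 ++ " - Thought: " ++ content], st.2 + 1)
      else if role = "tool" then
        (st.1 ++ ["Step " ++ PySem.Int.toStr st.2 ++ " - Observation: " ++ content], st.2 + 1)
      else st) (lines, step)
      = (lines ++ pvLines messages step, step + (pvLines messages step).length) := by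
  induction messages generalizing lines step with
  | nil => simp [pvLines]
  | cons m t ih =>
    simp only [List.foldl_cons, pvLines]
    by_cases h : PySem.Str.strip ((PySem.Dict.mk m).getD "content" "") = ""
    · simp [h, ih]
    · simp only [if_neg h]
      set role := ((PySem.Dict.mk m).get? "role").getD "" with hrole
      by_cases ha : role = "assistant"
      · simp only [if_pos ha, ih, List.length_cons]
        exact Prod.ext (by simp) (by simp; omega)
      · by_cases ht : role = "tool"
        · simp only [if_neg ha, if_pos ht, ih, List.length_cons]
          exact Prod.ext (by simp) (by simp; omega)
        · simp [ha, ht, ih]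

theorem pvJoin_cons (a : String) (l : List String) (hl : l ≠ []) :
    PySem.Str.join "\n" (a :: l) = a ++ "\n" ++ PySem.Str.join "\n" l := by
  obtain ⟨b, t, rfl⟩ := List.exists_cons_of_ne_nil hl
  rw [← String.toList_inj]
  simp [PySem.Str.toList_join, PySem.Chars.join_cons_cons]

theorem pvJoin_singleton (a : String) : PySem.Str.join "\n" [a] = a := by
  rw [← String.toList_inj]
  simp [PySem.Str.toList_join, PySem.Chars.join_singleton]

-- B's recursion renders exactly A's line list.
theorem pvFmt_eq_lines (messages : List (List (String × String))) (step : Int) :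
    pvFmt messages step
      = (match pvLines messages step with
         | [] => none
         | l => some (PySem.Str.join "\n" l)) := by
  induction messages generalizing step with
  | nil => simp [pvFmt, pvLines]
  | cons m t ih =>
    simp only [pvFmt, pvLines]
    by_cases h : PySem.Str.strip ((PySem.Dict.mk m).getD "content" "") = ""
    · simp [h, ih]
    · by_cases ha : (((PySem.Dict.mk m).get? "role").getD "") = "assistant"
      · cases hl : pvLines t (step + 1) with
        | nil => simp [h, ha, hl, ih, pvJoin_singleton]
        | cons b bs => simp [h, ha, hl, ih, pvJoin_cons]
      · by_cases ht : (((PySem.Dict.mk m).get? "role").getD "") = "tool"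
        · cases hl : pvLines t (step + 1) with
          | nil => simp [h, ht, hl, ih, pvJoin_singleton]
          | cons b bs => simp [h, ht, hl, ih, pvJoin_cons]
        · simp [h, ha, ht, ih]

-- ===== VERDICT (by name: the statement is the Claim_ definition above) =====
theorem build_react_history_str_py_spec : Claim_equal_build_react_history_str_py := by
  intro messages _ _
  unfold Spec_build_react_history_str_py build_react_history_str_py build_react_history_str_py_alt
  rw [pvFoldA_eq, pvFmt_eq_lines]
  simp only [List.nil_append]
  cases pvLines messages 1 <;> simp
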